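-- pv_equiv track=rewrite | github.com/egoistcookie/WaterDemo | backend/app.py | pick_best_doubao_image_url
-- ===== SOURCE A (Python) =====
-- def pick_best_doubao_image_url(urls):
--     """
--     选择最合适的豆包图片URL：优先不含 watermark 的候选；如果候选不可访问，则回退到可访问的URL。
--     注意：部分“无水印候选”可能需要登录态（Cookie）才能访问。
--     """
--     if not urls:
--         return None, None
--
--     def is_watermarked(u):
--         return 'watermark' in (u or '') or '~tplv-' in (u or '')
--
--     no_wm = None
--     wm = None
--     for u in urls:
--         if not u:
--             continue
--         if no_wm is None and not is_watermarked(u):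
--             no_wm = u
--         if wm is None and is_watermarked(u):
--             wm = u
--         if no_wm and wm:
--             break
--
--     # 兜底：如果没找到明显分类，就取第一个
--     if no_wm is None:
--         no_wm = urls[0]
--     if wm is None:
--         wm = urls[0]
--
--     return no_wm, wm
-- ===== SOURCE B (Python) =====
-- def pick_best_doubao_image_url(urls):
--     if not urls:
--         return None, None
--
--     def is_watermarked(u):
--         return 'watermark' in (u or '') or '~tplv-' in (u or '')
--
--     no_wm = next((u for u in urls if u and not is_watermarked(u)), None)
--     wm = next((u for u in urls if u and is_watermarked(u)), None)
--     if no_wm is None: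
--         no_wm = urls[0]
--     if wm is None:
--         wm = urls[0]
--     return no_wm, wm
-- ===== Notes on version B (the rewrite author's own statement) =====
-- stated objective: idiomatic
-- what changed: The single fused loop with two mutable slots and an early break is replaced by two independent first-match searches (next over a generator), each finding its category directly, with the same urls[0] fallback.
import Mathlib
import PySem

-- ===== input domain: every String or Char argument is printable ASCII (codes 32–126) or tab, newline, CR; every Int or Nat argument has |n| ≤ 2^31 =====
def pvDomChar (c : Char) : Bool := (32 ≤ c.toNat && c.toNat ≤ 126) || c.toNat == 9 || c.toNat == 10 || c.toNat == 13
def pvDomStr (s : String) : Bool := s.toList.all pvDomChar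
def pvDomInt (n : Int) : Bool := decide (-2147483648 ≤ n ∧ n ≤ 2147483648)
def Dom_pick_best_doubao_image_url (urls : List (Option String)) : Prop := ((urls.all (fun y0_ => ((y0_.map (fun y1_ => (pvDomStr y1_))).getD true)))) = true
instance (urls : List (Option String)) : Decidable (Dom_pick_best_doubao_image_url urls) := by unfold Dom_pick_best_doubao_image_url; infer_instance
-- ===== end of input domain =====

-- B is the same task written idiomatically: two independent first-match searches instead of
-- A's fused loop with two mutable slots and an early break; return values proved equal.

-- truthiness of an Optional[str]: `if not u` is true for None and ''
def pvTruthy (u : Option String) : Bool :=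
  match u with
  | none => false
  | some s => s != ""

-- the shared helper is_watermarked (identical in A and B):
-- 'watermark' in (u or '') or '~tplv-' in (u or '')
def pvIsWatermarked (u : Option String) : Bool :=
  PySem.Str.isIn "watermark" (u.getD "") || PySem.Str.isIn "~tplv-" (u.getD "")

-- ===== PORT A =====
-- the for-loop of A: state (no_wm, wm), `continue` on falsy u, `break` once both are truthy
def pvLoopA : List (Option String) → Option String → Option String → Option String × Option String
  | [], no_wm, wm => (no_wm, wm)
  | u :: rest, no_wm, wm =>
    if !pvTruthy u then pvLoopA rest no_wm wm
    else
      let no_wm' := if no_wm == none && !pvIsWatermarked u then u else no_wm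
      let wm' := if wm == none && pvIsWatermarked u then u else wm
      if pvTruthy no_wm' && pvTruthy wm' then (no_wm', wm')
      else pvLoopA rest no_wm' wm'

def pick_best_doubao_image_url (urls : List (Option String)) : Option String × Option String :=
  match urls with
  | [] => (none, none)
  | u0 :: _ =>
    let r := pvLoopA urls none none
    let no_wm := if r.1 == none then u0 else r.1
    let wm := if r.2 == none then u0 else r.2
    (no_wm, wm)

-- ===== PORT B =====
def pick_best_doubao_image_url_alt (urls : List (Option String)) : Option String × Option String :=
  match urls with
  | [] => (none, none)
  | u0 :: _ =>
    -- next((u for u in urls if u and not is_watermarked(u)), None)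
    let no_wm0 := (urls.find? (fun u => pvTruthy u && !pvIsWatermarked u)).join
    -- next((u for u in urls if u and is_watermarked(u)), None)
    let wm0 := (urls.find? (fun u => pvTruthy u && pvIsWatermarked u)).join
    (if no_wm0 == none then u0 else no_wm0, if wm0 == none then u0 else wm0)

-- ===== PRECONDITION & SPEC =====
def Spec_pick_best_doubao_image_url (urls : List (Option String)) (out : Option String × Option String) : Prop := out = pick_best_doubao_image_url_alt urls
instance (urls : List (Option String)) (out : Option String × Option String) : Decidable (Spec_pick_best_doubao_image_url urls out) := by unfold Spec_pick_best_doubao_image_url; infer_instance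

-- ===== CLAIM (what is proved, stated in full; the proofs are below) =====
def Claim_equal_pick_best_doubao_image_url : Prop := ∀ (urls : List (Option String)), Dom_pick_best_doubao_image_url urls → Spec_pick_best_doubao_image_url urls (pick_best_doubao_image_url urls)

-- ===== LEMMAS AND PROOFS =====

@[simp] lemma pvTruthy_none : pvTruthy none = false := rfl

lemma pvTruthy_ne_none {w : Option String} (hw : pvTruthy w = true) : w ≠ none := by
  cases w with
  | none => simp [pvTruthy] at hw
  | some s => simp

-- once wm is truthy, the loop only searches for the first non-watermarked truthy url
lemma pvLoopA_wm_set (l : List (Option String)) (w : Option String) (hw : pvTruthy w = true) :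
    pvLoopA l none w = ((l.find? (fun u => pvTruthy u && !pvIsWatermarked u)).join, w) := by
  induction l with
  | nil => simp [pvLoopA]
  | cons u rest ih =>
    by_cases ht : pvTruthy u = true
    · by_cases hm : pvIsWatermarked u = true
      · simp [pvLoopA, List.find?, ht, hm, pvTruthy_ne_none hw, ih]
      · simp at hm
        simp [pvLoopA, List.find?, ht, hm, hw]
    · simp at ht
      simp [pvLoopA, List.find?, ht, ih]

-- once no_wm is truthy, the loop only searches for the first watermarked truthy url
lemma pvLoopA_nw_set (l : List (Option String)) (nw : Option String) (hn : pvTruthy nw = true) :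
    pvLoopA l nw none = (nw, (l.find? (fun u => pvTruthy u && pvIsWatermarked u)).join) := by
  induction l with
  | nil => simp [pvLoopA]
  | cons u rest ih =>
    have hne : (nw == none) = false := by
      cases nw with
      | none => simp [pvTruthy] at hn
      | some s => rfl
    by_cases ht : pvTruthy u = true
    · by_cases hm : pvIsWatermarked u = true
      · simp [pvLoopA, List.find?, ht, hm, hn, hne]
      · simp at hm
        simp [pvLoopA, List.find?, ht, hm, hn, hne, ih]
    · simp at ht
      simp [pvLoopA, List.find?, ht, ih]

-- the full loop from the initial (None, None) state computes both first matches
lemma pvLoopA_start (l : List (Option String)) :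
    pvLoopA l none none =
      ((l.find? (fun u => pvTruthy u && !pvIsWatermarked u)).join,
       (l.find? (fun u => pvTruthy u && pvIsWatermarked u)).join) := by
  induction l with
  | nil => simp [pvLoopA]
  | cons u rest ih =>
    by_cases ht : pvTruthy u = true
    · by_cases hm : pvIsWatermarked u = true
      · simp [pvLoopA, List.find?, ht, hm, pvLoopA_wm_set rest u ht]
      · simp at hm
        simp [pvLoopA, List.find?, ht, hm, pvLoopA_nw_set rest u ht]
    · simp at ht
      simp [pvLoopA, List.find?, ht, ih]

-- ===== VERDICT (by name: the statement is the Claim_ definition above) =====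
theorem pick_best_doubao_image_url_spec : Claim_equal_pick_best_doubao_image_url := by
  intro urls _
  unfold Spec_pick_best_doubao_image_url
  cases urls with
  | nil => rfl
  | cons u0 rest =>
    simp only [pick_best_doubao_image_url, pick_best_doubao_image_url_alt, pvLoopA_start]
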